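-- pv_equiv track=rewrite | github.com/MaximDondin/TestTask | task3/task3.py | old_versions
-- ===== SOURCE A (Python) =====
-- def old_versions(my_vers, my_sort):
--     old_vers = []
--     my_vers = my_vers.split('.')
--     my_sort.append(my_vers)
--     new_sort = sorted(my_sort)
--     for i_list in new_sort:
--         if i_list != my_vers:
--             old_vers.append(i_list)
--         else:
--             break
--     return old_vers
-- ===== SOURCE B (Python) =====
-- def old_versions(my_vers, my_sort):
--     my_vers = my_vers.split('.')
--     my_sort.append(my_vers)
--     return sorted([x for x in my_sort if x < my_vers])
-- ===== Notes on version B (the rewrite author's own statement) =====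
-- stated objective: alternative
-- what changed: A sorts the whole appended list and scans the sorted result until it hits my_vers (break); B filters out the elements strictly less than the split my_vers first and sorts only that subset, with the same append side effect.
import Mathlib
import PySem

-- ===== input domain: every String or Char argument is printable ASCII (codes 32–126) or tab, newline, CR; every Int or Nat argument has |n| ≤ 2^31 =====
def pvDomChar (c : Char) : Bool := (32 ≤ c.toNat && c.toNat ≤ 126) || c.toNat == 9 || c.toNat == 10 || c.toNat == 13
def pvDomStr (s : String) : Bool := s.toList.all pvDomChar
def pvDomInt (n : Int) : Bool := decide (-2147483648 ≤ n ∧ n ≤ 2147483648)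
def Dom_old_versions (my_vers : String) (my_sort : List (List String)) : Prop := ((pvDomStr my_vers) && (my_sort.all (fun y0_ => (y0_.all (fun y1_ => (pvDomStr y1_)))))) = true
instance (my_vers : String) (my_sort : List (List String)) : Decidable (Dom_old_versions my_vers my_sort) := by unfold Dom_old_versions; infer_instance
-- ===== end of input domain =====

-- B filters the elements strictly below the split version first and sorts only that subset
-- (same append side effect on my_sort), instead of sorting everything and scanning up to the break.

-- ===== PORT A =====
-- the for-loop with break: append elements until one equals my_vers
def old_versions_loop (v : List String) : List (List String) → List (List String) → List (List String)
  | acc, [] => acc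
  | acc, x :: xs => if x ≠ v then old_versions_loop v (acc ++ [x]) xs else acc

def old_versions (my_vers : String) (my_sort : List (List String)) : List (List String) :=
  let old_vers : List (List String) := []
  -- my_vers.split('.'): sep "." ≠ "" so split? is always some
  let v := (PySem.Str.split? my_vers ".").getD []
  let new_sort := PySem.List.sorted (my_sort ++ [v]) (fun x => x) false
  old_versions_loop v old_vers new_sort

-- ===== PORT B =====
def old_versions_alt (my_vers : String) (my_sort : List (List String)) : List (List String) :=
  let v := (PySem.Str.split? my_vers ".").getD []
  PySem.List.sorted ((my_sort ++ [v]).filter (fun x => decide (x < v))) (fun x => x) false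

-- ===== PRECONDITION & SPEC =====
def Spec_old_versions (my_vers : String) (my_sort : List (List String)) (out : List (List String)) : Prop := out = old_versions_alt my_vers my_sort
instance (my_vers : String) (my_sort : List (List String)) (out : List (List String)) : Decidable (Spec_old_versions my_vers my_sort out) := by unfold Spec_old_versions; infer_instance

-- ===== CLAIM (what is proved, stated in full; the proofs are below) =====
def Claim_equal_old_versions : Prop := ∀ (my_vers : String) (my_sort : List (List String)), Dom_old_versions my_vers my_sort → Spec_old_versions my_vers my_sort (old_versions my_vers my_sort)

-- ===== LEMMAS AND PROOFS =====

-- sorted does not depend on which (propositionally equal) DecidableLT instance elaboration picked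
theorem sorted_congr_inst {α κ : Type} [LT κ] (d1 d2 : DecidableLT κ)
    (l : List α) (k : α → κ) (r : Bool) :
    @PySem.List.sorted α κ _ d1 l k r = @PySem.List.sorted α κ _ d2 l k r := by
  congr 1

-- A's loop over a ≤-sorted list containing v collects exactly the elements strictly below v
theorem old_versions_loop_eq_filter (v : List String) (s acc : List (List String))
    (hs : s.Pairwise (· ≤ ·)) (hv : v ∈ s) :
    old_versions_loop v acc s = acc ++ s.filter (fun x => decide (x < v)) := by
  induction s generalizing acc with
  | nil => cases hv
  | cons x t ih =>
    rcases List.pairwise_cons.mp hs with ⟨hx, ht⟩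
    by_cases hxv : x = v
    · subst hxv
      have : t.filter (fun y => decide (y < x)) = [] := by
        rw [List.filter_eq_nil_iff]
        intro y hy
        simpa using not_lt.mpr (hx y hy)
      simp [old_versions_loop, this]
    · have hvt : v ∈ t := by
        rcases List.mem_cons.mp hv with h | h
        · exact absurd h.symm hxv
        · exact h
      have hxlt : x < v := lt_of_le_of_ne (hx v hvt) hxv
      rw [old_versions_loop]
      simp only [hxv, ne_eq, not_false_eq_true, if_true]
      rw [ih (acc ++ [x]) ht hvt]
      simp [hxlt]

-- filtering commutes with Python's sort (identity key, Bool predicate)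
theorem filter_sorted_comm (p : List String → Bool) (l : List (List String)) :
    (PySem.List.sorted l (fun x => x) false).filter p
      = PySem.List.sorted (l.filter p) (fun x => x) false := by
  rw [sorted_congr_inst _ (@LinearOrder.toDecidableLT (List String) _) l,
      sorted_congr_inst _ (@LinearOrder.toDecidableLT (List String) _) (l.filter p)]
  apply PySem.List.eq_of_perm_of_pairwise_le_of_injective (key := fun x => x)
    (fun _ _ h => h)
  · exact ((@PySem.List.sorted_perm (List String) (List String)
        List.instLinearOrder.toLT LinearOrder.toDecidableLT l (fun x => x) false).filter p).trans
      (@PySem.List.sorted_perm (List String) (List String)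
        List.instLinearOrder.toLT LinearOrder.toDecidableLT (l.filter p) (fun x => x) false).symm
  · exact (PySem.List.sorted_pairwise l (fun x => x)).filter p
  · exact PySem.List.sorted_pairwise (l.filter p) (fun x => x)

-- ===== VERDICT (by name: the statement is the Claim_ definition above) =====
theorem old_versions_spec : Claim_equal_old_versions := by
  intro my_vers my_sort _
  unfold Spec_old_versions old_versions old_versions_alt
  set v := (PySem.Str.split? my_vers ".").getD [] with hv
  show old_versions_loop v [] (PySem.List.sorted (my_sort ++ [v]) (fun x => x) false)
    = PySem.List.sorted ((my_sort ++ [v]).filter (fun x => decide (x < v))) (fun x => x) false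
  have hpair : List.Pairwise (· ≤ ·) (PySem.List.sorted (my_sort ++ [v]) (fun x => x) false) := by
    have h := PySem.List.sorted_pairwise (my_sort ++ [v]) (fun x => x)
    rw [sorted_congr_inst _ (fun a b : List String => a.decidableLT b) (my_sort ++ [v])] at h
    exact h
  have hmem : v ∈ PySem.List.sorted (my_sort ++ [v]) (fun x => x) false := by
    rw [PySem.List.mem_sorted]; simp
  rw [old_versions_loop_eq_filter v _ [] hpair hmem, List.nil_append, filter_sorted_comm]
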